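-- pv_equiv track=rewrite | github.com/harryhartley/Advent-of-Code-2022 | python/day02/src/main.py | silver
-- ===== SOURCE A (Python) =====
-- def silver(input):
--     total = 0
--     for game in input:
--         if game[1] == 'X':
--             total += 1
--             if game[0] == 'C':
--                 total += 6
--             elif game[0] == 'A':
--                 total += 3
--         elif game[1] == 'Y':
--             total += 2
--             if game[0] == 'A':
--                 total += 6
--             elif game[0] == 'B':
--                 total += 3
--         elif game[1] == 'Z':
--             total += 3
--             if game[0] == 'B':
--                 total += 6
--             elif game[0] == 'C':
--                 total += 3
--     return total
-- ===== SOURCE B (Python) =====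
-- def silver(input):
--     ys = [g[1] for g in input]
--     pairs = [(g[0], g[1]) for g in input]
--     return (ys.count('X') + 2 * ys.count('Y') + 3 * ys.count('Z')
--             + 6 * (pairs.count(('C', 'X')) + pairs.count(('A', 'Y')) + pairs.count(('B', 'Z')))
--             + 3 * (pairs.count(('A', 'X')) + pairs.count(('B', 'Y')) + pairs.count(('C', 'Z'))))
-- ===== Notes on version B (the rewrite author's own statement) =====
-- stated objective: alternative
-- what changed: Instead of scoring each round as it is scanned, B first projects the input into a list of own moves and a list of (opponent, own) pairs, then computes the total as a closed-form weighted sum of nine list.count queries (frequency counting instead of per-round branch scoring).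
import Mathlib
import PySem

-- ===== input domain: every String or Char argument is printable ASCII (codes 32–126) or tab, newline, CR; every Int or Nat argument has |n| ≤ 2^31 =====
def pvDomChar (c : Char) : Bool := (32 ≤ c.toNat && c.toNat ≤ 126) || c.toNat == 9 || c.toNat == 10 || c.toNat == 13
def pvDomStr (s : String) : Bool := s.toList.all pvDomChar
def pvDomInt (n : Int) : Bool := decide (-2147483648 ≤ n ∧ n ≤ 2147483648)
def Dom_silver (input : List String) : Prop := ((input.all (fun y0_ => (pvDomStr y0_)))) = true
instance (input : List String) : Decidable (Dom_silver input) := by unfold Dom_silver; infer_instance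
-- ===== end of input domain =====

-- B replaces A's per-round branch scoring with staged frequency counting: project the rounds,
-- then a closed-form weighted sum of nine list.count queries (objective: alternative).

-- ===== PORT A =====
-- literal transliteration of A's branch cascade; the 'none' arms of the matches
-- correspond to Python's IndexError (excluded by Pre_silver)
def silver (input : List String) : Int :=
  input.foldl (fun total game =>
    match PySem.Str.pyGet? game 1 with
    | none => total
    | some c1 =>
      if c1 = 'X' then
        let total := total + 1
        match PySem.Str.pyGet? game 0 with
        | none => total
        | some c0 =>
          if c0 = 'C' then total + 6
          else if c0 = 'A' then total + 3
          else total
      else if c1 = 'Y' then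
        let total := total + 2
        match PySem.Str.pyGet? game 0 with
        | none => total
        | some c0 =>
          if c0 = 'A' then total + 6
          else if c0 = 'B' then total + 3
          else total
      else if c1 = 'Z' then
        let total := total + 3
        match PySem.Str.pyGet? game 0 with
        | none => total
        | some c0 =>
          if c0 = 'B' then total + 6
          else if c0 = 'C' then total + 3
          else total
      else total) 0

-- ===== PORT B =====
-- the Option layer mirrors Python indexing: a 'none' is the IndexError excluded by Pre_silver
def silver_alt (input : List String) : Int :=
  let ys := input.map (fun g => PySem.Str.pyGet? g 1)
  let pairs := input.map (fun g => (PySem.Str.pyGet? g 0, PySem.Str.pyGet? g 1))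
  (PySem.List.count ys (some 'X') : Int)
  + 2 * (PySem.List.count ys (some 'Y') : Int)
  + 3 * (PySem.List.count ys (some 'Z') : Int)
  + 6 * ((PySem.List.count pairs (some 'C', some 'X') : Int)
       + (PySem.List.count pairs (some 'A', some 'Y') : Int)
       + (PySem.List.count pairs (some 'B', some 'Z') : Int))
  + 3 * ((PySem.List.count pairs (some 'A', some 'X') : Int)
       + (PySem.List.count pairs (some 'B', some 'Y') : Int)
       + (PySem.List.count pairs (some 'C', some 'Z') : Int))

-- ===== PRECONDITION & SPEC =====
-- both A and B raise IndexError on any string of length < 2 (game[1]); Pre_ excludes exactly those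
def Pre_silver (input : List String) : Prop := ∀ game ∈ input, 2 ≤ game.toList.length
instance (input : List String) : Decidable (Pre_silver input) := by unfold Pre_silver; infer_instance
def pvWitness_silver : List String := ["AX", "CY", "BZ"]

def Spec_silver (input : List String) (out : Int) : Prop := out = silver_alt input
instance (input : List String) (out : Int) : Decidable (Spec_silver input out) := by unfold Spec_silver; infer_instance

-- ===== CLAIM (what is proved, stated in full; the proofs are below) =====
def Claim_equal_silver : Prop := ∀ (input : List String), Dom_silver input → Pre_silver input → Spec_silver input (silver input)

-- ===== LEMMAS AND PROOFS =====

-- the score of a single round (c0 = opponent move, c1 = own move), as A computes it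
def scoreOf (c0 c1 : Char) : Int :=
  if c1 = 'X' then 1 + (if c0 = 'C' then 6 else if c0 = 'A' then 3 else 0)
  else if c1 = 'Y' then 2 + (if c0 = 'A' then 6 else if c0 = 'B' then 3 else 0)
  else if c1 = 'Z' then 3 + (if c0 = 'B' then 6 else if c0 = 'C' then 3 else 0)
  else 0

theorem two_chars (g : String) (h : 2 ≤ g.toList.length) :
    ∃ c0 c1, PySem.Str.pyGet? g 0 = some c0 ∧ PySem.Str.pyGet? g 1 = some c1 := by
  match hl : g.toList with
  | [] => simp [hl] at h
  | [c] => simp [hl] at h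
  | c0 :: c1 :: rest =>
    refine ⟨c0, c1, ?_, ?_⟩
    · rw [show (0 : Int) = ((0 : Nat) : Int) by simp, PySem.Str.pyGet?_natCast]; simp [hl]
    · rw [show (1 : Int) = ((1 : Nat) : Int) by simp, PySem.Str.pyGet?_natCast]; simp [hl]

theorem alt_cons (g : String) (gs : List String) (c0 c1 : Char)
    (h0 : PySem.Str.pyGet? g 0 = some c0) (h1 : PySem.Str.pyGet? g 1 = some c1) :
    silver_alt (g :: gs) = scoreOf c0 c1 + silver_alt gs := by
  simp only [silver_alt, List.map_cons, h0, h1, PySem.List.count_eq, List.count_cons, scoreOf]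
  push_cast
  by_cases e1 : c1 = 'X' <;> by_cases e2 : c1 = 'Y' <;> by_cases e3 : c1 = 'Z' <;>
    by_cases f1 : c0 = 'A' <;> by_cases f2 : c0 = 'B' <;> by_cases f3 : c0 = 'C' <;>
    simp_all <;> ring

theorem silver_foldl_eq (l : List String) (hp : ∀ game ∈ l, 2 ≤ game.toList.length)
    (total : Int) :
    l.foldl (fun total game =>
      match PySem.Str.pyGet? game 1 with
      | none => total
      | some c1 =>
        if c1 = 'X' then
          let total := total + 1
          match PySem.Str.pyGet? game 0 with
          | none => total
          | some c0 =>
            if c0 = 'C' then total + 6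
            else if c0 = 'A' then total + 3
            else total
        else if c1 = 'Y' then
          let total := total + 2
          match PySem.Str.pyGet? game 0 with
          | none => total
          | some c0 =>
            if c0 = 'A' then total + 6
            else if c0 = 'B' then total + 3
            else total
        else if c1 = 'Z' then
          let total := total + 3
          match PySem.Str.pyGet? game 0 with
          | none => total
          | some c0 =>
            if c0 = 'B' then total + 6
            else if c0 = 'C' then total + 3
            else total
        else total) total = total + silver_alt l := by
  induction l generalizing total with
  | nil => simp [silver_alt]
  | cons g gs ih =>
    obtain ⟨c0, c1, h0, h1⟩ := two_chars g (hp g (by simp))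
    have hstep : (match PySem.Str.pyGet? g 1 with
      | none => total
      | some c1 =>
        if c1 = 'X' then
          let total := total + 1
          match PySem.Str.pyGet? g 0 with
          | none => total
          | some c0 =>
            if c0 = 'C' then total + 6
            else if c0 = 'A' then total + 3
            else total
        else if c1 = 'Y' then
          let total := total + 2
          match PySem.Str.pyGet? g 0 with
          | none => total
          | some c0 =>
            if c0 = 'A' then total + 6
            else if c0 = 'B' then total + 3
            else total
        else if c1 = 'Z' then
          let total := total + 3
          match PySem.Str.pyGet? g 0 with
          | none => total
          | some c0 =>
            if c0 = 'B' then total + 6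
            else if c0 = 'C' then total + 3
            else total
        else total) = total + scoreOf c0 c1 := by
      rw [h0, h1]
      simp only [scoreOf]
      split_ifs <;> ring
    simp only [List.foldl_cons, hstep,
      ih (fun game hm => hp game (by simp [hm])) (total + scoreOf c0 c1),
      alt_cons g gs c0 c1 h0 h1]
    ring

-- ===== VERDICT (by name: the statement is the Claim_ definition above) =====
theorem silver_spec : Claim_equal_silver := by
  intro input _ hpre
  unfold Spec_silver silver
  rw [silver_foldl_eq input hpre 0]
  ring
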